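-- pv_equiv track=rewrite | github.com/g-r-a-n-t/fe | benchmarks/foundry-abi/scripts/run_gas_report.py | parse_contract_tables
-- ===== SOURCE A (Python) =====
-- from collections import defaultdict
--
-- def parse_contract_tables(text: str) -> dict[str, dict[str, int]]:
--     contract_tables: dict[str, dict[str, int]] = defaultdict(dict)
--     current_contract: str | None = None
--     in_function_table = False
--
--     for raw_line in text.splitlines():
--         line = raw_line.strip()
--         if not line.startswith("|"):
--             continue
--
--         cols = [part.strip() for part in line.strip("|").split("|")]
--         if cols and cols[0].endswith("Contract"):
--             current_contract = cols[0]
--             in_function_table = False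
--             continue
--
--         if cols and cols[0] == "Function Name":
--             in_function_table = True
--             continue
--
--         if not in_function_table or current_contract is None:
--             continue
--
--         if len(cols) != 6:
--             continue
--
--         name = cols[0]
--         if not name or name == "Deployment Cost" or name.startswith("-"):
--             continue
--
--         try:
--             avg = int(cols[2])
--         except ValueError:
--             continue
--
--         contract_tables[current_contract][name] = avg
--
--     return contract_tables
-- ===== SOURCE B (Python) =====
-- def parse_contract_tables(text: str) -> dict[str, dict[str, int]]:
--     # Parse all pipe rows into stripped cell lists.
--     rows = [[cell.strip() for cell in line.strip("|").split("|")]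
--             for line in (raw.strip() for raw in text.splitlines())
--             if line.startswith("|")]
--
--     # Partition the rows into contract sections; rows before the first
--     # contract header belong to no contract and are discarded.
--     sections = []
--     i, n = 0, len(rows)
--     while i < n and not rows[i][0].endswith("Contract"):
--         i += 1
--     while i < n:
--         contract = rows[i][0]
--         j = i + 1
--         while j < n and not rows[j][0].endswith("Contract"):
--             j += 1
--         sections.append((contract, rows[i + 1:j]))
--         i = j
--
--     result: dict[str, dict[str, int]] = {}
--     for contract, section in sections:
--         heads = [cols[0] for cols in section]
--         if "Function Name" not in heads:
--             continue
--         body = section[heads.index("Function Name") + 1:]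
--         for cols in body:
--             if len(cols) != 6:
--                 continue
--             name = cols[0]
--             if (not name or name in ("Deployment Cost", "Function Name")
--                     or name.startswith("-")):
--                 continue
--             try:
--                 avg = int(cols[2])
--             except ValueError:
--                 continue
--             result.setdefault(contract, {})[name] = avg
--     return result
-- ===== Notes on version B (the rewrite author's own statement) =====
-- stated objective: alternative
-- what changed: A runs a single state-machine fold over the lines with current-contract and in-table flags; B parses the pipe rows once, partitions them into contract sections at the header rows, then locates each section's 'Function Name' header and parses only the rows after it.
import Mathlib
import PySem

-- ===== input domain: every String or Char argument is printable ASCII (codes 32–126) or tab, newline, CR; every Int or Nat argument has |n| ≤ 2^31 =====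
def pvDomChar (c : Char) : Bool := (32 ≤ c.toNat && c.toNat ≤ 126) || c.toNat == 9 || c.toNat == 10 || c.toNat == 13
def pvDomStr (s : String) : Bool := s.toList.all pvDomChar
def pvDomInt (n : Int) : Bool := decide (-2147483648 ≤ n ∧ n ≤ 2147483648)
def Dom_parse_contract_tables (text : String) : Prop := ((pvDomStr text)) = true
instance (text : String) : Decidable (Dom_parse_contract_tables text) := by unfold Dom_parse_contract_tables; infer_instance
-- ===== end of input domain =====

-- B re-groups the work: parse the pipe rows once, partition them into contract sections, then parse each
-- section's function table — replacing A's single three-variable state-machine fold (objective: alternative decomposition).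


-- shared cell parser: '[part.strip() for part in line.strip("|").split("|")]' (identical in both Pythons)
def pvCells (line : String) : List String :=
  (PySem.Chars.splitOn (PySem.Chars.stripChars line.toList ['|']) ['|']).map
    (fun cell => String.ofList (PySem.Chars.strip cell))

-- ===== PORT A =====
-- state: (contract_tables, current_contract, in_function_table)
abbrev pvSt := PySem.Dict String (PySem.Dict String Int) × Option String × Bool

-- A's branch chain on the parsed, stripped cells of one pipe row
def pvRowStep (st : pvSt) (cols : List String) : pvSt :=
  match cols with
  | [] => st                                   -- 'if cols' fails everywhere: every branch skipped
  | c0 :: _ =>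
    if PySem.Str.endswith c0 "Contract" then (st.1, some c0, false)
    else if c0 == "Function Name" then (st.1, st.2.1, true)
    else if !st.2.2 then st
    else match st.2.1 with
      | none => st
      | some contract =>
        if cols.length ≠ 6 then st
        else if c0 == "" || c0 == "Deployment Cost" || PySem.Str.startswith c0 "-" then st
        else match PySem.Int.ofStr? (cols.getD 2 "") with
          | none => st
          | some avg => (st.1.modify contract PySem.Dict.empty (fun d => d.insert c0 avg), st.2.1, st.2.2)

-- A's loop body on one raw line
def pvStepA (st : pvSt) (raw_line : String) : pvSt :=
  if PySem.Str.startswith (PySem.Str.strip raw_line) "|" then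
    pvRowStep st (pvCells (PySem.Str.strip raw_line))
  else st

def parse_contract_tables (text : String) : List (String × List (String × Int)) :=
  (((PySem.Str.splitlines text).foldl pvStepA
      (PySem.Dict.empty, none, false)).1.items).map (fun p => (p.1, p.2.items))

-- ===== PORT B =====
-- one raw line ↦ its stripped cells, if it is a pipe row
def pvRow (raw : String) : Option (List String) :=
  if PySem.Str.startswith (PySem.Str.strip raw) "|" then
    some (pvCells (PySem.Str.strip raw))
  else none

-- cols[0] (a parsed pipe row is never empty, so the default is never consulted)
def pvHead : List String → String
  | [] => ""
  | c :: _ => c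

def pvIsHeader (cols : List String) : Bool := PySem.Str.endswith (pvHead cols) "Contract"

-- partition the rows into contract sections (rows before the first header are discarded)
def pvSections : List (List String) → List (String × List (List String))
  | [] => []
  | r :: rest =>
    if pvIsHeader r then
      (pvHead r, rest.takeWhile (fun x => !pvIsHeader x)) ::
        pvSections (rest.dropWhile (fun x => !pvIsHeader x))
    else pvSections rest
termination_by rows => rows.length
decreasing_by
  · exact Nat.lt_succ_of_le (List.length_dropWhile_le _ _)
  · exact Nat.lt_succ_of_le (Nat.le_refl _)

-- the rows after the first 'Function Name' header of a section (none: no function table)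
def pvBody (sec : List (List String)) : Option (List (List String)) :=
  match sec.dropWhile (fun cols => pvHead cols != "Function Name") with
  | [] => none
  | _ :: rest => some rest

-- one body row: the filters and the int() parse, accumulating into the contract's table
def pvAddRow (t : PySem.Dict String (PySem.Dict String Int)) (contract : String)
    (cols : List String) : PySem.Dict String (PySem.Dict String Int) :=
  if cols.length ≠ 6 then t
  else if pvHead cols == "" || pvHead cols == "Deployment Cost" || pvHead cols == "Function Name"
      || PySem.Str.startswith (pvHead cols) "-" then t
  else match PySem.Int.ofStr? (cols.getD 2 "") with
    | none => t
    | some avg => t.modify contract PySem.Dict.empty (fun d => d.insert (pvHead cols) avg)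

-- one section: find its function table and parse every body row
def pvSecFold (t : PySem.Dict String (PySem.Dict String Int))
    (sec : String × List (List String)) : PySem.Dict String (PySem.Dict String Int) :=
  match pvBody sec.2 with
  | none => t
  | some body => body.foldl (fun t cols => pvAddRow t sec.1 cols) t

def parse_contract_tables_alt (text : String) : List (String × List (String × Int)) :=
  ((pvSections ((PySem.Str.splitlines text).filterMap pvRow)).foldl pvSecFold
      PySem.Dict.empty).items.map (fun p => (p.1, p.2.items))

-- ===== PRECONDITION & SPEC =====
def Spec_parse_contract_tables (text : String) (out : List (String × List (String × Int))) : Prop := out = parse_contract_tables_alt text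
instance (text : String) (out : List (String × List (String × Int))) : Decidable (Spec_parse_contract_tables text out) := by unfold Spec_parse_contract_tables; infer_instance

-- ===== CLAIM (what is proved, stated in full; the proofs are below) =====
def Claim_equal_parse_contract_tables : Prop := ∀ (text : String), Dom_parse_contract_tables text → Spec_parse_contract_tables text (parse_contract_tables text)

-- ===== LEMMAS AND PROOFS =====

lemma pvSections_nil : pvSections [] = [] := by rw [pvSections]

lemma pvSections_cons (r : List String) (rest : List (List String)) :
    pvSections (r :: rest) =
      if pvIsHeader r then
        (pvHead r, rest.takeWhile (fun x => !pvIsHeader x)) ::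
          pvSections (rest.dropWhile (fun x => !pvIsHeader x))
      else pvSections rest := by rw [pvSections]

-- A's fold over raw lines is the fold of its row transition over the parsed pipe rows
lemma foldA_eq_foldRows (lines : List String) (st : pvSt) :
    lines.foldl pvStepA st = (lines.filterMap pvRow).foldl pvRowStep st := by
  induction lines generalizing st with
  | nil => rfl
  | cons l ls ih =>
    rw [List.foldl_cons, List.filterMap_cons]
    by_cases h : PySem.Str.startswith (PySem.Str.strip l) "|" = true
    · have h1 : pvRow l = some (pvCells (PySem.Str.strip l)) := by
        unfold pvRow; rw [if_pos h]
      have h2 : pvStepA st l = pvRowStep st (pvCells (PySem.Str.strip l)) := by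
        unfold pvStepA; rw [if_pos h]
      rw [h1, h2, List.foldl_cons]; exact ih _
    · have h1 : pvRow l = none := by unfold pvRow; rw [if_neg h]
      have h2 : pvStepA st l = st := by unfold pvStepA; rw [if_neg h]
      rw [h1, h2]; exact ih _

-- a repeated 'Function Name' header row never adds an entry
lemma pvAddRow_fn (t : PySem.Dict String (PySem.Dict String Int)) (c : String)
    (cs : List String) : pvAddRow t c ("Function Name" :: cs) = t := by
  simp [pvAddRow, pvHead]

-- header transition: a contract-header row resets the state from anywhere
lemma rowStep_header (st : pvSt) (c0 : String) (cs : List String)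
    (hc : PySem.Str.endswith c0 "Contract" = true) :
    pvRowStep st (c0 :: cs) = (st.1, some c0, false) := by
  simp only [pvRowStep, hc, reduceIte, Bool.false_eq_true, if_false]

-- 'Function Name' transition: the flag is set, everything else kept
lemma rowStep_fn (t : PySem.Dict String (PySem.Dict String Int)) (cur : Option String)
    (b : Bool) (cs : List String) :
    pvRowStep (t, cur, b) ("Function Name" :: cs) = (t, cur, true) := by
  have hc : PySem.Str.endswith "Function Name" "Contract" = false := by decide
  simp only [pvRowStep, hc, reduceIte, Bool.false_eq_true, if_false, beq_self_eq_true]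

-- without a current contract only the two header branches can change the state
lemma rowStep_skip_none (t : PySem.Dict String (PySem.Dict String Int)) (b : Bool)
    (c0 : String) (cs : List String) (hc : PySem.Str.endswith c0 "Contract" = false)
    (hfn : (c0 == "Function Name") = false) :
    pvRowStep (t, none, b) (c0 :: cs) = (t, none, b) := by
  cases b <;>
    simp only [pvRowStep, hc, hfn, reduceIte, Bool.false_eq_true, if_false, Bool.not_false, Bool.not_true]

-- with the flag cleared an ordinary row is skipped
lemma rowStep_skip_false (t : PySem.Dict String (PySem.Dict String Int)) (cur : Option String)
    (c0 : String) (cs : List String) (hc : PySem.Str.endswith c0 "Contract" = false)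
    (hfn : (c0 == "Function Name") = false) :
    pvRowStep (t, cur, false) (c0 :: cs) = (t, cur, false) := by
  simp only [pvRowStep, hc, hfn, reduceIte, Bool.false_eq_true, if_false, Bool.not_false]

-- in-table transition: with a current contract and the flag set, a non-header row is pvAddRow
lemma rowStep_inTable (t : PySem.Dict String (PySem.Dict String Int)) (c : String)
    (cols : List String) (hh : pvIsHeader cols = false) :
    pvRowStep (t, some c, true) cols = (pvAddRow t c cols, some c, true) := by
  match cols with
  | [] => simp [pvRowStep, pvAddRow]
  | c0 :: cs =>
    have hc : PySem.Str.endswith c0 "Contract" = false := by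
      simpa [pvIsHeader, pvHead] using hh
    by_cases hfn : c0 = "Function Name"
    · subst hfn
      rw [rowStep_fn, pvAddRow_fn]
    · have hfn' : (c0 == "Function Name") = false := by simpa using hfn
      simp only [pvRowStep, pvAddRow, pvHead, hc, hfn', reduceIte, Bool.false_eq_true, if_false, Bool.not_true,
        Bool.false_or, Bool.or_false]
      split_ifs <;> try rfl
      cases PySem.Int.ofStr? ((c0 :: cs).getD 2 "") <;> rfl

-- prepending a pre-header row to a section does not change its parsed table
lemma pvSecFold_skip (t : PySem.Dict String (PySem.Dict String Int)) (c : String)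
    (r : List String) (sec : List (List String))
    (hfn : (pvHead r != "Function Name") = true) :
    pvSecFold t (c, r :: sec) = pvSecFold t (c, sec) := by
  simp only [pvSecFold, pvBody, List.dropWhile_cons, hfn, reduceIte, Bool.false_eq_true, if_false]

-- the section body opened by a 'Function Name' row parses exactly the remaining rows
lemma pvSecFold_fn (t : PySem.Dict String (PySem.Dict String Int)) (c : String)
    (r : List String) (sec : List (List String))
    (hfn : (pvHead r != "Function Name") = false) :
    pvSecFold t (c, r :: sec) = sec.foldl (fun t cols => pvAddRow t c cols) t := by
  simp only [pvSecFold, pvBody, List.dropWhile_cons, hfn, reduceIte, Bool.false_eq_true, if_false]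

-- a section with no rows has no 'Function Name' header and contributes nothing
lemma pvSecFold_nil (t : PySem.Dict String (PySem.Dict String Int)) (c : String) :
    pvSecFold t (c, []) = t := rfl

-- the three-state invariant relating A's state machine to B's section decomposition
lemma main_inv (rows : List (List String)) :
    (∀ (t : PySem.Dict String (PySem.Dict String Int)) (b : Bool),
        (rows.foldl pvRowStep (t, none, b)).1 = (pvSections rows).foldl pvSecFold t) ∧
    (∀ (t : PySem.Dict String (PySem.Dict String Int)) (c : String),
        (rows.foldl pvRowStep (t, some c, false)).1 =
          (pvSections (rows.dropWhile (fun x => !pvIsHeader x))).foldl pvSecFold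
            (pvSecFold t (c, rows.takeWhile (fun x => !pvIsHeader x)))) ∧
    (∀ (t : PySem.Dict String (PySem.Dict String Int)) (c : String),
        (rows.foldl pvRowStep (t, some c, true)).1 =
          (pvSections (rows.dropWhile (fun x => !pvIsHeader x))).foldl pvSecFold
            ((rows.takeWhile (fun x => !pvIsHeader x)).foldl
              (fun t cols => pvAddRow t c cols) t)) := by
  induction rows with
  | nil =>
    refine ⟨fun t b => by simp [pvSections_nil], fun t c => ?_, fun t c => ?_⟩
    · simp [pvSections_nil, pvSecFold_nil]
    · simp [pvSections_nil]
  | cons r rest ih =>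
    obtain ⟨ih1, ih2, ih3⟩ := ih
    by_cases hH : pvIsHeader r = true
    · -- contract-header row: reset the state / open a new section
      obtain ⟨c0, cs, rfl⟩ : ∃ c0 cs, r = c0 :: cs := by
        cases r with
        | nil => exact absurd hH (by decide)
        | cons c0 cs => exact ⟨c0, cs, rfl⟩
      have hc : PySem.Str.endswith c0 "Contract" = true := by
        simpa [pvIsHeader, pvHead] using hH
      have hnH : (!pvIsHeader (c0 :: cs)) = false := by rw [hH]; rfl
      refine ⟨fun t b => ?_, fun t c => ?_, fun t c => ?_⟩
      · rw [List.foldl_cons, rowStep_header _ _ _ hc, ih2, pvSections_cons]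
        simp only [hH, reduceIte, Bool.false_eq_true, if_false, List.foldl_cons, pvHead]
      · rw [List.foldl_cons, rowStep_header _ _ _ hc, ih2, List.takeWhile_cons,
          List.dropWhile_cons]
        simp only [hnH, Bool.not_true, reduceIte, Bool.false_eq_true, if_false, pvSections_cons, hH, List.foldl_cons, pvSecFold_nil, pvHead]
      · rw [List.foldl_cons, rowStep_header _ _ _ hc, ih2, List.takeWhile_cons,
          List.dropWhile_cons]
        simp only [hnH, Bool.not_true, reduceIte, Bool.false_eq_true, if_false, pvSections_cons, hH, List.foldl_cons, List.foldl_nil, pvHead]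
    · have hH' : pvIsHeader r = false := eq_false_of_ne_true hH
      have hnH : (!pvIsHeader r) = true := by rw [hH']; rfl
      by_cases hfn : pvHead r = "Function Name"
      · -- a 'Function Name' header row: it only sets the flag
        obtain ⟨cs, rfl⟩ : ∃ cs, r = "Function Name" :: cs := by
          cases r with
          | nil => exact absurd hfn (by decide)
          | cons c0 cs => exact ⟨cs, by rw [show c0 = "Function Name" from hfn]⟩
        have hb : (pvHead ("Function Name" :: cs) != "Function Name") = false := by
          simp [pvHead]
        refine ⟨fun t b => ?_, fun t c => ?_, fun t c => ?_⟩
        · rw [List.foldl_cons, rowStep_fn, ih1, pvSections_cons]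
          simp only [hH', reduceIte, Bool.false_eq_true, if_false]
        · rw [List.foldl_cons, rowStep_fn, ih3, List.takeWhile_cons, List.dropWhile_cons]
          simp only [hnH, reduceIte, Bool.false_eq_true, if_false]
          rw [pvSecFold_fn _ _ _ _ hb]
        · rw [List.foldl_cons, rowStep_fn, ih3, List.takeWhile_cons, List.dropWhile_cons]
          simp only [hnH, reduceIte, Bool.false_eq_true, if_false, List.foldl_cons, pvAddRow_fn]
      · -- ordinary row
        have hb : (pvHead r != "Function Name") = true := by simpa using hfn
        refine ⟨fun t b => ?_, fun t c => ?_, fun t c => ?_⟩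
        · have hs : pvRowStep (t, none, b) r = (t, none, b) := by
            match r with
            | [] => rfl
            | c0 :: cs =>
              have hc : PySem.Str.endswith c0 "Contract" = false := by
                simpa [pvIsHeader, pvHead] using hH'
              have hfn' : (c0 == "Function Name") = false := by
                simpa [pvHead] using hfn
              exact rowStep_skip_none t b c0 cs hc hfn'
          rw [List.foldl_cons, hs, ih1, pvSections_cons]
          simp only [hH', reduceIte, Bool.false_eq_true, if_false]
        · have hs : pvRowStep (t, some c, false) r = (t, some c, false) := by
            match r with
            | [] => rfl
            | c0 :: cs =>
              have hc : PySem.Str.endswith c0 "Contract" = false := by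
                simpa [pvIsHeader, pvHead] using hH'
              have hfn' : (c0 == "Function Name") = false := by
                simpa [pvHead] using hfn
              exact rowStep_skip_false t (some c) c0 cs hc hfn'
          rw [List.foldl_cons, hs, ih2, List.takeWhile_cons, List.dropWhile_cons]
          simp only [hnH, reduceIte, Bool.false_eq_true, if_false]
          rw [pvSecFold_skip _ _ _ _ hb]
        · rw [List.foldl_cons, rowStep_inTable t c r hH', ih3, List.takeWhile_cons,
            List.dropWhile_cons]
          simp only [hnH, reduceIte, Bool.false_eq_true, if_false, List.foldl_cons]

-- ===== VERDICT (by name: the statement is the Claim_ definition above) =====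
theorem parse_contract_tables_spec : Claim_equal_parse_contract_tables := by
  intro text _
  unfold Spec_parse_contract_tables parse_contract_tables parse_contract_tables_alt
  rw [foldA_eq_foldRows, (main_inv _).1]
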